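-- pv_equiv track=rewrite | github.com/pongib/helm | src/service.py | expand_environments
-- ===== SOURCE A (Python) =====
-- from typing import Any, Dict, List, Tuple
--
-- MAX_EXPANSION = 1000
--
-- def expand_environments(environments: Dict[str, List[str]]):
--     """
--     `environments` is a map from variable names to a list of strings.
--     Return: a list of environments, where for each variable, we choose one of its string.
--     """
--     output_environments: List[Dict[str, str]] = []
--     def recurse(old_items: List[Tuple[str, str]], new_items: List[Tuple[str, str]]):
--         if len(output_environments) >= MAX_EXPANSION:
--             return
--         if len(old_items) == 0:
--             output_environments.append(dict(new_items))
--         else: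
--             item, rest_old_items = old_items[0], old_items[1:]
--             key, list_value = item
--             for elem_value in list_value:
--                 recurse(rest_old_items, new_items + [(key, elem_value)])
--     recurse(list(environments.items()), [])
--     return output_environments
-- ===== SOURCE B (Python) =====
-- from typing import Dict, List
--
-- MAX_EXPANSION = 1000
--
-- def expand_environments(environments: Dict[str, List[str]]):
--     """Iterative product build: extend a running list of partial environments one
--     variable at a time (as O(1)-shared linked chains), stopping each round as soon
--     as MAX_EXPANSION partial environments exist, then materialize each chain."""
--     envs = [()]  # a chain is () or (parent_chain, (key, value))
--     for key, values in environments.items():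
--         new = []
--         for e in envs:
--             if len(new) >= MAX_EXPANSION:
--                 break
--             for v in values:
--                 new.append((e, (key, v)))
--                 if len(new) >= MAX_EXPANSION:
--                     break
--         envs = new
--     output = []
--     for chain in envs:
--         items = []
--         while chain:
--             chain, kv = chain
--             items.append(kv)
--         output.append(dict(reversed(items)))
--     return output
-- ===== Notes on version B (the rewrite author's own statement) =====
-- stated objective: alternative
-- what changed: Replaced the capped depth-first recursion (mutable output list, early return) by an iterative breadth-wise product build: a running list of partial environments, stored as O(1)-shared linked chains, is extended one variable at a time and each round stops as soon as MAX_EXPANSION chains exist; chains are materialized into dicts at the end.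
import Mathlib
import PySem

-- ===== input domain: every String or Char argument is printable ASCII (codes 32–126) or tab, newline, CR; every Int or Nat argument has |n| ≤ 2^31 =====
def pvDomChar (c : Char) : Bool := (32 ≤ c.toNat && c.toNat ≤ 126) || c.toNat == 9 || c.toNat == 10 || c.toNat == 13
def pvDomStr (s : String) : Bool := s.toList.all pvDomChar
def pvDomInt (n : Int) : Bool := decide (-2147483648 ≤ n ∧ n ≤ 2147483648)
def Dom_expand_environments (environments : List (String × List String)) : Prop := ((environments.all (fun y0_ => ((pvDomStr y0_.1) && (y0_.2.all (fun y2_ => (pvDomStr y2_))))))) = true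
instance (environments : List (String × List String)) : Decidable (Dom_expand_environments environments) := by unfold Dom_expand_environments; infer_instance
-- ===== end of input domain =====

-- B replaces A's capped depth-first recursion by an iterative product build over linked
-- chains that stops each round at MAX_EXPANSION partial environments (objective: alternative).

-- ===== PORT A =====
-- the nested function `recurse`, with the mutable `output_environments` threaded as `out`
def pvRecurseA (olds : List (String × List String)) (news : List (String × String))
    (out : List (List (String × String))) : List (List (String × String)) :=
  if out.length ≥ 1000 then out
  else
    match olds with
    | [] => out ++ [(PySem.Dict.ofList news).items]   -- dict(new_items)
    | (k, vs) :: rest => vs.foldl (fun acc v => pvRecurseA rest (news ++ [(k, v)]) acc) out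

def expand_environments (environments : List (String × List String)) : List (List (String × String)) :=
  pvRecurseA environments [] []

-- ===== PORT B =====
-- a Python chain `()`/`(parent, (key, v))` is a Lean list consed at the front (head = last extension)
-- inner loop over `values`: append, then break once `new` holds 1000 chains
def pvInnerB (k : String) (e : List (String × String)) :
    List String → List (List (String × String)) → List (List (String × String))
  | [], new => new
  | v :: vs, new =>
      if (new ++ [(k, v) :: e]).length ≥ 1000 then new ++ [(k, v) :: e]
      else pvInnerB k e vs (new ++ [(k, v) :: e])

-- outer loop over `envs`: break before extending once `new` holds 1000 chains
def pvOuterB (k : String) (vs : List String) :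
    List (List (String × String)) → List (List (String × String)) → List (List (String × String))
  | [], new => new
  | e :: rest, new =>
      if new.length ≥ 1000 then new else pvOuterB k vs rest (pvInnerB k e vs new)

def expand_environments_alt (environments : List (String × List String)) : List (List (String × String)) :=
  (environments.foldl (fun envs kv => pvOuterB kv.1 kv.2 envs []) [[]]).map
    (fun e => (PySem.Dict.ofList e.reverse).items)   -- walk the chain, dict(reversed(items))

-- ===== PRECONDITION & SPEC =====
def Spec_expand_environments (environments : List (String × List String)) (out : List (List (String × String))) : Prop := out = expand_environments_alt environments
instance (environments : List (String × List String)) (out : List (List (String × String))) : Decidable (Spec_expand_environments environments out) := by unfold Spec_expand_environments; infer_instance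

-- ===== CLAIM (what is proved, stated in full; the proofs are below) =====
def Claim_equal_expand_environments : Prop := ∀ (environments : List (String × List String)), Dom_expand_environments environments → Spec_expand_environments environments (expand_environments environments)

-- ===== LEMMAS AND PROOFS =====

-- the uncapped Cartesian product, in A's (and itertools.product's) order
def pvProd : List (String × List String) → List (List (String × String))
  | [] => [[]]
  | (k, vs) :: rest => vs.flatMap (fun v => (pvProd rest).map (fun e => (k, v) :: e))

lemma pv_len_flatMap_const {α β : Type} (l : List α) (g : α → List β) (m : ℕ)
    (h : ∀ a, (g a).length = m) : (l.flatMap g).length = l.length * m := by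
  induction l with
  | nil => simp
  | cons a t ih => simp [List.flatMap_cons, ih, h, Nat.succ_mul, Nat.add_comm]

lemma pv_recurseA_eq (olds : List (String × List String)) :
    ∀ (news : List (String × String)) (out : List (List (String × String))),
      pvRecurseA olds news out =
        out ++ (((pvProd olds).map (fun e => (PySem.Dict.ofList (news ++ e)).items)).take
                  (1000 - out.length)) := by
  induction olds with
  | nil =>
      intro news out
      unfold pvRecurseA
      by_cases h : out.length ≥ 1000
      · simp [h, Nat.sub_eq_zero_of_le h]
      · have h1 : 1 ≤ 1000 - out.length := by omega
        simp [h, pvProd]; exact h1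
  | cons kv rest ih =>
      obtain ⟨k, vs⟩ := kv
      intro news out
      unfold pvRecurseA
      by_cases h : out.length ≥ 1000
      · simp [h, Nat.sub_eq_zero_of_le h]
      · simp only [h]
        have inner : ∀ (vs' : List String) (out : List (List (String × String))),
            vs'.foldl (fun acc v => pvRecurseA rest (news ++ [(k, v)]) acc) out =
              out ++ ((vs'.flatMap (fun v =>
                  (pvProd rest).map (fun e => (PySem.Dict.ofList (news ++ (k, v) :: e)).items))).take
                    (1000 - out.length)) := by
          intro vs'
          induction vs' with
          | nil => intro out; simp
          | cons v vs' ihv =>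
              intro out
              simp only [List.foldl_cons, List.flatMap_cons]
              rw [ihv, ih]
              have hF : (fun e => (PySem.Dict.ofList ((news ++ [(k, v)]) ++ e)).items)
                  = (fun e => (PySem.Dict.ofList (news ++ (k, v) :: e)).items) := by
                funext e; simp
              rw [hF, List.append_assoc]
              congr 1
              rw [List.take_append]
              congr 2
              simp only [List.length_append, List.length_take]
              omega
        rw [inner]
        simp only [pvProd, List.map_flatMap, List.map_map]
        rfl

lemma pv_innerB_eq (k : String) (e : List (String × String)) :
    ∀ (vs : List String) (new : List (List (String × String))), new.length < 1000 →
      pvInnerB k e vs new = new ++ ((vs.map (fun v => (k, v) :: e)).take (1000 - new.length)) := by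
  intro vs
  induction vs with
  | nil => intro new _; simp [pvInnerB]
  | cons v vs ih =>
      intro new hnew
      unfold pvInnerB
      by_cases h : (new ++ [(k, v) :: e]).length ≥ 1000
      · rw [if_pos h]
        have h1 : 1000 - new.length = 1 := by simp at h; omega
        simp [h1]
      · rw [if_neg h]
        have hlt : (new ++ [(k, v) :: e]).length < 1000 := by omega
        rw [ih _ hlt]
        have h1 : 1000 - new.length = (1000 - (new ++ [(k, v) :: e]).length) + 1 := by
          simp; omega
        rw [h1, List.map_cons, List.take_succ_cons, List.append_assoc]
        rfl

lemma pv_outerB_eq (k : String) (vs : List String) :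
    ∀ (envs new : List (List (String × String))),
      pvOuterB k vs envs new =
        new ++ ((envs.flatMap (fun e => vs.map (fun v => (k, v) :: e))).take (1000 - new.length)) := by
  intro envs
  induction envs with
  | nil => intro new; simp [pvOuterB]
  | cons e rest ih =>
      intro new
      unfold pvOuterB
      by_cases h : new.length ≥ 1000
      · simp [h, Nat.sub_eq_zero_of_le h]
      · rw [if_neg h]
        rw [pv_innerB_eq k e vs new (by omega), ih, List.flatMap_cons, List.append_assoc]
        congr 1
        rw [List.take_append]
        congr 2
        simp only [List.length_append, List.length_take, List.length_map]
        omega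

lemma pv_foldlB_eq (l : List (String × List String)) :
    ∀ (S : List (List (String × String))), S.length ≤ 1000 →
      l.foldl (fun envs kv => pvOuterB kv.1 kv.2 envs []) S
        = (S.flatMap (fun e => (pvProd l).map (fun t => t.reverse ++ e))).take 1000 := by
  induction l with
  | nil =>
      intro S hS
      simp only [List.foldl_nil, pvProd]
      have : S.flatMap (fun e => [([] : List (String × String)).reverse ++ e]) = S := by simp
      simpa [this] using (List.take_of_length_le hS).symm
  | cons kv rest ih =>
      obtain ⟨k, vs⟩ := kv
      intro S hS
      simp only [List.foldl_cons]
      have hstep : pvOuterB k vs S [] = (S.flatMap (fun e => vs.map (fun v => (k, v) :: e))).take 1000 := by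
        simpa using pv_outerB_eq k vs S []
      rw [hstep]
      set T := S.flatMap (fun e => vs.map (fun v => (k, v) :: e)) with hT
      have hlen : (T.take 1000).length ≤ 1000 := by simp [List.length_take]
      rw [ih (T.take 1000) hlen]
      set g := fun e => (pvProd rest).map (fun t => (t.reverse : List (String × String)) ++ e) with hg
      have hm : ∀ e, (g e).length = (pvProd rest).length := by intro e; simp [hg]
      -- reassociation: one step of the product
      have reassoc : T.flatMap g
          = S.flatMap (fun e => (pvProd ((k, vs) :: rest)).map (fun t => t.reverse ++ e)) := by
        rw [hT, List.flatMap_assoc]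
        congr 1; funext e
        rw [List.flatMap_map]
        simp only [pvProd, List.map_flatMap, List.map_map, hg]
        congr 1; funext v
        congr 1; funext t
        simp
      rw [← reassoc]
      -- truncating the intermediate list at 1000 does not change the first 1000 results
      by_cases hm0 : (pvProd rest).length = 0
      · have hnil : ∀ (L : List (List (String × String))), L.flatMap g = [] := by
          intro L
          rw [List.flatMap_eq_nil_iff]
          intro e _
          exact List.eq_nil_of_length_eq_zero ((hm e).trans hm0)
        rw [hnil, hnil]
      · have hsplit : T.flatMap g = (T.take 1000).flatMap g ++ (T.drop 1000).flatMap g := by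
          rw [← List.flatMap_append, List.take_append_drop]
        rw [hsplit, List.take_append]
        rcases Nat.le_total T.length 1000 with hle | hgt
        · simp [List.drop_eq_nil_of_le hle]
        · have hx : 1000 ≤ ((T.take 1000).flatMap g).length := by
            rw [pv_len_flatMap_const _ g (pvProd rest).length hm, List.length_take]
            have h1 : min 1000 T.length = 1000 := by omega
            rw [h1]
            have h2 : 1 ≤ (pvProd rest).length := by omega
            calc 1000 = 1000 * 1 := by omega
              _ ≤ 1000 * (pvProd rest).length := Nat.mul_le_mul_left _ h2
          rw [Nat.sub_eq_zero_of_le hx]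
          simp

-- ===== VERDICT (by name: the statement is the Claim_ definition above) =====
theorem expand_environments_spec : Claim_equal_expand_environments := by
  intro env _
  unfold Spec_expand_environments expand_environments expand_environments_alt
  rw [pv_recurseA_eq, pv_foldlB_eq _ [[]] (by simp)]
  simp [List.flatMap_cons, List.map_take, List.map_map, Function.comp_def, List.reverse_reverse]
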